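-- pv_equiv track=rewrite | github.com/mohamedelbanoe1907/automata_practical_exam_-20912021100250- | automata_practical_exam_[20912021100250]/problem2_cfg_to_gnf/gnf_converter.py | find_nullable_non_terminals
-- ===== SOURCE A (Python) =====
-- def find_nullable_non_terminals(grammar, non_terminals):
--     nullable = set()
--     non_terminals_set = set(non_terminals)
--     for V in non_terminals:
--         if V in grammar:
--             if any(prod == ['!epsilon'] for prod in grammar[V]): nullable.add(V)
--     changed = True
--     while changed:
--         changed = False
--         for V in non_terminals:
--             if V in nullable: continue
--             if V not in grammar: continue
--             for production in grammar[V]: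
--                 if production == ['!epsilon']: continue
--                 if production:
--                     all_syms_nullable = True
--                     for symbol in production:
--                         is_terminal = symbol not in non_terminals_set
--                         if not is_terminal and symbol not in nullable:
--                             all_syms_nullable = False; break
--                         elif is_terminal and symbol != '!epsilon':
--                              all_syms_nullable = False; break
--                     if all_syms_nullable:
--                         if V not in nullable: nullable.add(V); changed = True
--                         break
--     return nullable
-- ===== SOURCE B (Python) =====
-- def find_nullable_non_terminals(grammar, non_terminals):
--     eps = '!epsilon'
--     nts = set(non_terminals)
--     # Index all productions once: a flat list `prods` plus per-non-terminal id lists.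
--     prods = []
--     prod_ids = {}
--     for V in non_terminals:
--         if V in prod_ids:
--             continue
--         if V not in grammar:
--             continue
--         ids = []
--         for p in grammar[V]:
--             ids.append(len(prods))
--             prods.append(p)
--         prod_ids[V] = ids
--     # Static eligibility: a production can only ever be all-nullable if it is non-empty,
--     # not the literal epsilon production, and contains no terminal other than '!epsilon'.
--     eligible = [bool(p) and p != [eps] and all(s in nts or s == eps for s in p)
--                 for p in prods]
--     # counter[pid] = number of symbol occurrences in prods[pid] that are non-terminals
--     # not yet known nullable.
--     counter = [sum(1 for s in p if s in nts) for p in prods]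
--     # Reverse index: symbol -> production ids containing it (once per occurrence).
--     rev = {}
--     for pid, p in enumerate(prods):
--         for s in p:
--             rev.setdefault(s, []).append(pid)
--     nullable = []
--
--     def add(V):
--         nullable.append(V)
--         for pid in rev.get(V, []):
--             counter[pid] -= 1
--
--     for V in non_terminals:
--         if V not in nullable and any(prods[pid] == [eps] for pid in prod_ids.get(V, [])):
--             add(V)
--     changed = True
--     while changed:
--         changed = False
--         for V in non_terminals:
--             if V in nullable:
--                 continue
--             if any(eligible[pid] and counter[pid] == 0 for pid in prod_ids.get(V, [])):
--                 add(V)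
--                 changed = True
--     return set(nullable)
-- ===== Notes on version B (the rewrite author's own statement) =====
-- stated objective: alternative
-- what changed: B builds a one-time flat production index with per-production non-nullable counters and a reverse symbol index, so each round tests readiness with a counter==0 lookup and decrements counters when a non-terminal becomes nullable, instead of rescanning every production's symbols each round.
import Mathlib
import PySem

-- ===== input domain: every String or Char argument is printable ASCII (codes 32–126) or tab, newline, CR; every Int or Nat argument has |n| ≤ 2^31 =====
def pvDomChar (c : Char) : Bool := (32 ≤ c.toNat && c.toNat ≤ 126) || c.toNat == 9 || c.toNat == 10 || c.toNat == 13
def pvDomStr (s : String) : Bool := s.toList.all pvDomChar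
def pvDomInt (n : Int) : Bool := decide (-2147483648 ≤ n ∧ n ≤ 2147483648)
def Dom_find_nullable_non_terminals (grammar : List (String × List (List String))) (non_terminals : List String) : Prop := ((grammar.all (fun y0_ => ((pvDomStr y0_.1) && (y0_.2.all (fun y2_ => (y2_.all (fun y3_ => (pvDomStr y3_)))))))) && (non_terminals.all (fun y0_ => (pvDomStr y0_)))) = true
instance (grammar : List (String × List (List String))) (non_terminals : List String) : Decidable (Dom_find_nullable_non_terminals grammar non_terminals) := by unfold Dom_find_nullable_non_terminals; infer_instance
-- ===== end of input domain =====

-- B replaces A's repeated per-round rescans of every production symbol by a one-time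
-- production index with per-production non-nullable counters and a reverse symbol index,
-- keeping A's round order (objective: alternative algorithm, same result).

-- ===== PORT A =====
-- inner symbol loop of A (with its early breaks)
def pvA_check (nts nullable : List String) : List String → Bool
  | [] => true
  | s :: rest =>
    let is_terminal := !(nts.contains s)
    if !is_terminal && !(nullable.contains s) then false
    else if is_terminal && !(s == "!epsilon") then false
    else pvA_check nts nullable rest

-- production loop of A's while-body (break on first all-nullable production)
def pvA_scan (nts nullable : List String) : List (List String) → Bool
  | [] => false
  | p :: rest =>
    if p == ["!epsilon"] then pvA_scan nts nullable rest
    else if !p.isEmpty then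
      (if pvA_check nts nullable p then true else pvA_scan nts nullable rest)
    else pvA_scan nts nullable rest

def pvA_round (g : PySem.Dict String (List (List String))) (nts non_terminals : List String)
    (st : List String × Bool) : List String × Bool :=
  non_terminals.foldl (fun st V =>
    if st.1.contains V then st
    else
      match g.get? V with
      | none => st
      | some ps => if pvA_scan nts st.1 ps then (PySem.Set.add st.1 V, true) else st) st

-- 'while changed' loop; fuel (length non_terminals + 1) is enough: each changed round
-- adds at least one new element of non_terminals to nullable
def pvA_loop (g : PySem.Dict String (List (List String))) (nts non_terminals : List String) :
    Nat → List String → List String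
  | 0, nullable => nullable
  | fuel+1, nullable =>
    let st := pvA_round g nts non_terminals (nullable, false)
    if st.2 then pvA_loop g nts non_terminals fuel st.1 else st.1

def find_nullable_non_terminals (grammar : List (String × List (List String))) (non_terminals : List String) : List String :=
  let g : PySem.Dict String (List (List String)) := PySem.Dict.mk grammar
  let nts : PySem.Set String := PySem.Set.ofList non_terminals
  let nullable : PySem.Set String :=
    non_terminals.foldl (fun nullable V =>
      match g.get? V with
      | none => nullable
      | some ps => if ps.any (fun p => p == ["!epsilon"]) then PySem.Set.add nullable V else nullable)
      PySem.Set.empty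
  pvA_loop g nts non_terminals (non_terminals.length + 1) nullable

-- ===== PORT B =====
-- one-time flat production index: prods and per-non-terminal id lists
def pvB_index (g : PySem.Dict String (List (List String))) (non_terminals : List String) :
    List (List String) × PySem.Dict String (List Nat) :=
  non_terminals.foldl (fun st V =>
    if st.2.contains V then st
    else
      match g.get? V with
      | none => st
      | some ps =>
        let q := ps.foldl (fun (q : List (List String) × List Nat) p => (q.1 ++ [p], q.2 ++ [q.1.length])) (st.1, ([] : List Nat))
        (q.1, st.2.insert V q.2))
    (([] : List (List String)), (PySem.Dict.empty : PySem.Dict String (List Nat)))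

-- static eligibility of a production
def pvB_elig (nts : List String) (p : List String) : Bool :=
  !p.isEmpty && !(p == ["!epsilon"]) && p.all (fun s => nts.contains s || s == "!epsilon")

-- reverse index: symbol -> production ids containing it (once per occurrence)
def pvB_rev (prods : List (List String)) : PySem.Dict String (List Nat) :=
  (prods.foldl (fun (st : PySem.Dict String (List Nat) × Nat) p =>
    (p.foldl (fun d s => d.modify s [] (fun l => l ++ [st.2])) st.1, st.2 + 1))
    ((PySem.Dict.empty : PySem.Dict String (List Nat)), 0)).1

-- add(V): record V nullable and decrement counters of productions containing V
def pvB_add (rev : PySem.Dict String (List Nat)) (st : List String × List Int) (V : String) :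
    List String × List Int :=
  (st.1 ++ [V], (rev.getD V []).foldl (fun c pid => c.set pid (c.getD pid 0 - 1)) st.2)

def pvB_round (prodIds : PySem.Dict String (List Nat)) (eligible : List Bool)
    (rev : PySem.Dict String (List Nat)) (non_terminals : List String)
    (st : List String × List Int × Bool) : List String × List Int × Bool :=
  non_terminals.foldl (fun st V =>
    if st.1.contains V then st
    else if (prodIds.getD V []).any (fun pid => eligible.getD pid false && (st.2.1.getD pid 0 == 0)) then
      let q := pvB_add rev (st.1, st.2.1) V
      (q.1, q.2, true)
    else st) st

def pvB_loop (prodIds : PySem.Dict String (List Nat)) (eligible : List Bool)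
    (rev : PySem.Dict String (List Nat)) (non_terminals : List String) :
    Nat → List String × List Int → List String
  | 0, st => st.1
  | fuel+1, st =>
    let r := pvB_round prodIds eligible rev non_terminals (st.1, st.2, false)
    if r.2.2 then pvB_loop prodIds eligible rev non_terminals fuel (r.1, r.2.1) else r.1

def find_nullable_non_terminals_alt (grammar : List (String × List (List String))) (non_terminals : List String) : List String :=
  let g : PySem.Dict String (List (List String)) := PySem.Dict.mk grammar
  let nts : PySem.Set String := PySem.Set.ofList non_terminals
  let ix := pvB_index g non_terminals
  let prods := ix.1
  let prodIds := ix.2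
  let eligible := prods.map (pvB_elig nts)
  let counter : List Int := prods.map (fun p => ((p.countP (fun s => nts.contains s)) : Int))
  let rev := pvB_rev prods
  let init :=
    non_terminals.foldl (fun (st : List String × List Int) V =>
      if !(st.1.contains V) && (prodIds.getD V []).any (fun pid => prods.getD pid [] == ["!epsilon"]) then
        pvB_add rev st V
      else st) (([] : List String), counter)
  pvB_loop prodIds eligible rev non_terminals (non_terminals.length + 1) init

-- ===== PRECONDITION & SPEC =====
def Spec_find_nullable_non_terminals (grammar : List (String × List (List String))) (non_terminals : List String) (out : List String) : Prop := out = find_nullable_non_terminals_alt grammar non_terminals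
instance (grammar : List (String × List (List String))) (non_terminals : List String) (out : List String) : Decidable (Spec_find_nullable_non_terminals grammar non_terminals out) := by unfold Spec_find_nullable_non_terminals; infer_instance

-- ===== CLAIM (what is proved, stated in full; the proofs are below) =====
def Claim_equal_find_nullable_non_terminals : Prop := ∀ (grammar : List (String × List (List String))) (non_terminals : List String), Dom_find_nullable_non_terminals grammar non_terminals → Spec_find_nullable_non_terminals grammar non_terminals (find_nullable_non_terminals grammar non_terminals)

-- ===== LEMMAS AND PROOFS =====


-- proof-only definitions

-- number of occurrences in p of non-terminal symbols not yet known nullable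
def pvCnt (nts N p : List String) : Nat :=
  p.countP (fun s => nts.contains s && !(N.contains s))

-- specification of the reverse index entry for symbol c, ids starting at n
def pvRevSpec : List (List String) → Nat → String → List Nat
  | [], _, _ => []
  | p :: l, n, c => List.replicate (p.count c) n ++ pvRevSpec l (n+1) c

-- the production index is a faithful flat view of the grammar rows used
def pvIdsOk (g : PySem.Dict String (List (List String))) (prods : List (List String))
    (prodIds : PySem.Dict String (List Nat)) (l : List String) : Prop :=
  ∀ V ∈ l,
    match g.get? V with
    | none => prodIds.getD V [] = []
    | some ps => ∃ n, prodIds.getD V [] = List.range' n ps.length ∧ n + ps.length ≤ prods.length ∧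
        ∀ i (_ : i < ps.length), prods.getD (n+i) [] = ps[i]

-- counters are exactly the per-production non-nullable occurrence counts
def pvCntInv (nts : List String) (prods : List (List String)) (N : List String) (c : List Int) : Prop :=
  c.length = prods.length ∧
  ∀ pid, pid < prods.length → c.getD pid 0 = ((pvCnt nts N (prods.getD pid [])) : Int)

theorem pv_getD_map {β : Type} (l : List (List String)) (f : List String → β) (d : β) (i : Nat)
    (h : i < l.length) : (l.map f).getD i d = f (l.getD i []) := by
  simp [List.getD, List.getElem?_map, List.getElem?_eq_getElem h]

theorem pv_check_eq (nts N p : List String) :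
    pvA_check nts N p = ((p.all (fun s => nts.contains s || s == "!epsilon")) && (pvCnt nts N p == 0)) := by
  induction p with
  | nil => simp [pvA_check, pvCnt]
  | cons s rest ih =>
    simp only [pvA_check, pvCnt, List.countP_cons, List.all_cons] at *
    by_cases h3 : s = "!epsilon"
    · subst h3
      by_cases h1 : "!epsilon" ∈ nts <;> by_cases h2 : "!epsilon" ∈ N <;> simp [h1, h2, ih]
    · by_cases h1 : s ∈ nts <;> by_cases h2 : s ∈ N <;> simp [h1, h2, h3, ih]

theorem pv_scan_eq (nts N : List String) (ps : List (List String)) :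
    pvA_scan nts N ps = ps.any (fun p => !(p == ["!epsilon"]) && !p.isEmpty && pvA_check nts N p) := by
  induction ps with
  | nil => simp [pvA_scan]
  | cons p rest ih =>
    simp only [pvA_scan, List.any_cons]
    by_cases h1 : p = ["!epsilon"]
    · simp [h1, ih]
    · by_cases h2 : p.isEmpty
      · have hp : p = [] := by simpa [List.isEmpty_iff] using h2
        simp [h1, h2, ih, hp]
      · by_cases h3 : pvA_check nts N p <;> simp [h1, h2, h3, ih]

theorem pv_inner_build (ps : List (List String)) (acc : List (List String)) (l0 : List Nat) :
    ps.foldl (fun q p => (q.1 ++ [p], q.2 ++ [q.1.length])) (acc, l0)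
      = (acc ++ ps, l0 ++ List.range' acc.length ps.length) := by
  induction ps generalizing acc l0 with
  | nil => simp
  | cons p ps ih =>
    simp only [List.foldl_cons, ih, List.length_append, List.length_cons, List.length_nil,
      List.range'_succ, Prod.mk.injEq]
    exact ⟨by simp, by simp [List.append_assoc]⟩

-- step function of pvB_index, and its closed form
def pvIdxStep (g : PySem.Dict String (List (List String))) :
    (List (List String) × PySem.Dict String (List Nat)) → String →
    (List (List String) × PySem.Dict String (List Nat)) :=
  fun st V =>
    if st.2.contains V then st
    else
      match g.get? V with
      | none => st
      | some ps =>
        let q := ps.foldl (fun (q : List (List String) × List Nat) p => (q.1 ++ [p], q.2 ++ [q.1.length])) (st.1, ([] : List Nat))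
        (q.1, st.2.insert V q.2)

theorem pvB_index_eq (g : PySem.Dict String (List (List String))) (nt : List String) :
    pvB_index g nt = nt.foldl (pvIdxStep g) (([] : List (List String)), (PySem.Dict.empty : PySem.Dict String (List Nat))) := rfl

theorem pvIdxStep_eq (g : PySem.Dict String (List (List String)))
    (st : List (List String) × PySem.Dict String (List Nat)) (V : String) :
    pvIdxStep g st V = if st.2.contains V then st else
      match g.get? V with
      | none => st
      | some ps => (st.1 ++ ps, st.2.insert V (List.range' st.1.length ps.length)) := by
  unfold pvIdxStep
  cases hg : g.get? V <;> simp [pv_inner_build, hg]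

-- what a registered id list means
def pvP (g : PySem.Dict String (List (List String))) (prods : List (List String))
    (V : String) (ids : List Nat) : Prop :=
  ∃ ps n, g.get? V = some ps ∧ ids = List.range' n ps.length ∧ n + ps.length ≤ prods.length ∧
    ∀ i (_ : i < ps.length), prods.getD (n+i) [] = ps[i]

theorem pv_P_mono (g : PySem.Dict String (List (List String))) (prods ext : List (List String))
    (V : String) (ids : List Nat) (h : pvP g prods V ids) : pvP g (prods ++ ext) V ids := by
  obtain ⟨ps, n, hg, hids, hb, hp⟩ := h
  refine ⟨ps, n, hg, hids, by simp; omega, fun i hi => ?_⟩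
  rw [List.getD_append _ _ _ _ (by omega), hp i hi]

theorem pv_index_inv (g : PySem.Dict String (List (List String))) (l : List String)
    (st : List (List String) × PySem.Dict String (List Nat))
    (h : ∀ V ids, st.2.get? V = some ids → pvP g st.1 V ids) :
    ∀ V ids, (l.foldl (pvIdxStep g) st).2.get? V = some ids →
      pvP g (l.foldl (pvIdxStep g) st).1 V ids := by
  induction l generalizing st with
  | nil => simpa using h
  | cons W l ih =>
    rw [List.foldl_cons]
    apply ih
    intro V ids hVids
    rw [pvIdxStep_eq] at hVids ⊢
    by_cases hc : st.2.contains W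
    · simp only [hc, if_true] at hVids ⊢
      exact h V ids hVids
    · cases hg : g.get? W with
      | none =>
        simp only [hc, hg, Bool.false_eq_true, if_false] at hVids ⊢
        exact h V ids hVids
      | some ps =>
        simp only [hc, hg, Bool.false_eq_true, if_false] at hVids ⊢
        by_cases hVW : V = W
        · subst hVW
          rw [PySem.Dict.get?_insert_self] at hVids
          cases hVids
          refine ⟨ps, st.1.length, hg, rfl, by simp, fun i hi => ?_⟩
          rw [List.getD_append_right _ _ _ _ (by omega)]
          simp [List.getD, List.getElem?_eq_getElem hi]
        · rw [PySem.Dict.get?_insert_of_ne (hne := hVW)] at hVids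
          exact pv_P_mono g st.1 ps V ids (h V ids hVids)

theorem pv_index_contains_mono (g : PySem.Dict String (List (List String))) (l : List String)
    (st : List (List String) × PySem.Dict String (List Nat)) (V : String)
    (h : st.2.contains V = true) : (l.foldl (pvIdxStep g) st).2.contains V = true := by
  induction l generalizing st with
  | nil => simpa using h
  | cons W l ih =>
    rw [List.foldl_cons]
    apply ih
    rw [pvIdxStep_eq]
    by_cases hc : st.2.contains W
    · simpa [hc] using h
    · cases hg : g.get? W with
      | none => simpa [hc, hg] using h
      | some ps => simp [hc, PySem.Dict.contains_insert, h]

theorem pv_index_complete (g : PySem.Dict String (List (List String))) (l : List String)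
    (st : List (List String) × PySem.Dict String (List Nat)) :
    ∀ V ∈ l, ∀ ps, g.get? V = some ps → (l.foldl (pvIdxStep g) st).2.contains V = true := by
  induction l generalizing st with
  | nil => simp
  | cons W l ih =>
    intro V hV ps hg
    rw [List.foldl_cons]
    rcases List.mem_cons.mp hV with rfl | hV'
    · apply pv_index_contains_mono g l _ V
      rw [pvIdxStep_eq]
      by_cases hc : st.2.contains V
      · simpa [hc] using hc
      · simp [hc, hg, PySem.Dict.contains_insert_self]
    · exact ih (pvIdxStep g st W) V hV' ps hg

theorem pv_index_ok (g : PySem.Dict String (List (List String))) (nt : List String) :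
    pvIdsOk g (pvB_index g nt).1 (pvB_index g nt).2 nt := by
  intro V hV
  rw [pvB_index_eq]
  have hinv := pv_index_inv g nt (([] : List (List String)), (PySem.Dict.empty : PySem.Dict String (List Nat)))
    (by intro V ids h; rw [PySem.Dict.get?_empty] at h; cases h)
  cases hg : g.get? V with
  | none =>
    simp only []
    rw [PySem.Dict.getD_eq_get?_getD]
    cases hq : (nt.foldl (pvIdxStep g) ([], PySem.Dict.empty)).2.get? V with
    | none => rfl
    | some ids =>
      obtain ⟨ps', n, hg', -⟩ := hinv V ids hq
      rw [hg] at hg'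
      cases hg'
  | some ps =>
    simp only []
    have hcont := pv_index_complete g nt ([], PySem.Dict.empty) V hV ps hg
    rw [PySem.Dict.contains_eq_isSome_get?] at hcont
    obtain ⟨ids, hq⟩ := Option.isSome_iff_exists.mp hcont
    obtain ⟨ps', n, hg', hids, hb, hp⟩ := hinv V ids hq
    rw [hg] at hg'
    cases hg'
    refine ⟨n, ?_, hb, hp⟩
    rw [PySem.Dict.getD_eq_get?_getD, hq, hids]
    rfl

theorem pv_rev_inner (p : List String) (d : PySem.Dict String (List Nat)) (pid : Nat) (c : String) :
    (p.foldl (fun d s => d.modify s [] (fun l => l ++ [pid])) d).getD c []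
      = d.getD c [] ++ List.replicate (p.count c) pid := by
  induction p generalizing d with
  | nil => simp
  | cons s rest ih =>
    rw [List.foldl_cons, ih, PySem.Dict.getD_modify, List.count_cons]
    by_cases hcs : c = s
    · subst hcs
      simp [List.count_cons_self, List.append_assoc, List.replicate_succ]
    · simp [hcs, Ne.symm hcs]
theorem pv_rev_fold (l : List (List String)) (d : PySem.Dict String (List Nat)) (n : Nat) (c : String) :
    ((l.foldl (fun (st : PySem.Dict String (List Nat) × Nat) p =>
      (p.foldl (fun d s => d.modify s [] (fun l => l ++ [st.2])) st.1, st.2 + 1)) (d, n)).1).getD c []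
      = d.getD c [] ++ pvRevSpec l n c := by
  induction l generalizing d n with
  | nil => simp [pvRevSpec]
  | cons p l ih =>
    rw [List.foldl_cons]
    simp only []
    rw [ih, pv_rev_inner, pvRevSpec, List.append_assoc]

theorem pv_rev_getD (prods : List (List String)) (c : String) :
    (pvB_rev prods).getD c [] = pvRevSpec prods 0 c := by
  rw [pvB_rev, pv_rev_fold, PySem.Dict.getD_empty, List.nil_append]
theorem pv_revSpec_mem (l : List (List String)) (n : Nat) (c : String) (j : Nat)
    (h : j ∈ pvRevSpec l n c) : n ≤ j ∧ j < n + l.length := by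
  induction l generalizing n with
  | nil => simp [pvRevSpec] at h
  | cons p l ih =>
    simp only [pvRevSpec, List.mem_append, List.mem_replicate] at h
    rcases h with ⟨-, rfl⟩ | h
    · simp
    · have := ih (n+1) h
      simp only [List.length_cons]
      omega

theorem pv_revSpec_count (l : List (List String)) (n : Nat) (c : String) (i : Nat)
    (h : i < l.length) : (pvRevSpec l n c).count (n+i) = (l.getD i []).count c := by
  induction l generalizing n i with
  | nil => simp at h
  | cons p l ih =>
    simp only [pvRevSpec, List.count_append, List.count_replicate]
    cases i with
    | zero =>
      have h0 : (pvRevSpec l (n+1) c).count n = 0 := by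
        rw [List.count_eq_zero]
        intro hmem
        have := pv_revSpec_mem l (n+1) c n hmem
        omega
      simp [h0]
    | succ i =>
      have e : n + (i+1) = (n+1) + i := by omega
      rw [e, List.getD_cons_succ, ← ih (n+1) i (by simpa using h)]
      simp
      intro he
      omega

theorem pv_foldDec_length (l : List Nat) (c : List Int) :
    (l.foldl (fun c pid => c.set pid (c.getD pid 0 - 1)) c).length = c.length := by
  induction l generalizing c with
  | nil => rfl
  | cons i l ih => rw [List.foldl_cons, ih, List.length_set]

theorem pv_foldDec_getD (l : List Nat) (c : List Int) (j : Nat)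
    (hb : ∀ pid ∈ l, pid < c.length) :
    (l.foldl (fun c pid => c.set pid (c.getD pid 0 - 1)) c).getD j 0
      = c.getD j 0 - (l.count j : Int) := by
  induction l generalizing c with
  | nil => simp
  | cons i l ih =>
    have hi : i < c.length := hb i (by simp)
    have hb' : ∀ pid ∈ l, pid < (c.set i (c.getD i 0 - 1)).length := by
      simpa [List.length_set] using fun pid hp => hb pid (by simp [hp])
    rw [List.foldl_cons, ih _ hb', List.count_cons]
    by_cases hij : i = j
    · subst hij
      simp [List.getD, List.getElem?_set_self hi, List.getElem?_eq_getElem hi]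
      ring
    · simp [List.getD, List.getElem?_set_ne hij, hij]

theorem pv_cnt_add (nts N p : List String) (V : String) (hV : nts.contains V = true)
    (hN : V ∉ N) : pvCnt nts (N ++ [V]) p + p.count V = pvCnt nts N p := by
  have hV' : V ∈ nts := by simpa using hV
  induction p with
  | nil => simp [pvCnt]
  | cons s rest ih =>
    simp only [pvCnt, List.countP_cons, List.count_cons] at *
    simp at ih ⊢
    by_cases hsV : s = V
    · subst hsV
      simp [hV', hN]
      omega
    · by_cases h1 : s ∈ nts <;> by_cases h2 : s ∈ N <;>
        simp [h1, h2, hsV] <;> omega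
theorem pv_add_inv (nts : List String) (prods : List (List String)) (N : List String)
    (c : List Int) (V : String) (hinv : pvCntInv nts prods N c) (hV : nts.contains V = true)
    (hN : V ∉ N) : pvCntInv nts prods (N ++ [V]) (pvB_add (pvB_rev prods) (N, c) V).2 := by
  obtain ⟨hlen, hget⟩ := hinv
  constructor
  · exact (pv_foldDec_length _ c).trans hlen
  · intro pid hpid
    have hb : ∀ q ∈ (pvB_rev prods).getD V [], q < c.length := by
      intro q hq
      rw [pv_rev_getD] at hq
      have := pv_revSpec_mem prods 0 V q hq
      omega
    have hdec := pv_foldDec_getD ((pvB_rev prods).getD V []) c pid hb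
    have hcount : ((pvB_rev prods).getD V []).count pid = (prods.getD pid []).count V := by
      rw [pv_rev_getD]
      simpa using pv_revSpec_count prods 0 V pid hpid
    have hadd := pv_cnt_add nts N (prods.getD pid []) V hV hN
    simp only [pvB_add]
    rw [hdec, hcount, hget pid hpid]
    omega

theorem pv_any_range' (ps : List (List String)) (n : Nat) (f : Nat → Bool) (gp : List String → Bool)
    (h : ∀ i (hi : i < ps.length), f (n+i) = gp ps[i]) :
    (List.range' n ps.length).any f = ps.any gp := by
  induction ps generalizing n with
  | nil => simp
  | cons p ps ih =>
    rw [List.length_cons, List.range'_succ, List.any_cons, List.any_cons]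
    have h0 := h 0 (by simp)
    simp only [Nat.add_zero] at h0
    rw [h0, ih (n+1) (fun i hi => by
      have := h (i+1) (by simpa using hi)
      simpa [Nat.add_assoc, Nat.add_comm 1 i, Nat.add_left_comm] using this)]
    simp

theorem pv_decide_eq (g : PySem.Dict String (List (List String))) (nts prods_nt : List String)
    (prods : List (List String)) (prodIds : PySem.Dict String (List Nat))
    (N : List String) (c : List Int) (V : String) (ps : List (List String))
    (hIds : pvIdsOk g prods prodIds prods_nt) (hV : V ∈ prods_nt)
    (hg : g.get? V = some ps) (hc : pvCntInv nts prods N c) :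
    (prodIds.getD V []).any (fun pid => (prods.map (pvB_elig nts)).getD pid false && (c.getD pid 0 == 0))
      = pvA_scan nts N ps := by
  have hIdsV := hIds V hV
  rw [hg] at hIdsV
  obtain ⟨n, hids, hb, hp⟩ := hIdsV
  rw [hids]
  have hpw : ∀ i (_ : i < ps.length),
      ((prods.map (pvB_elig nts)).getD (n+i) false && (c.getD (n+i) 0 == 0))
        = (pvB_elig nts ps[i] && (pvCnt nts N ps[i] == 0)) := by
    intro i hi
    have hlt : n + i < prods.length := by omega
    rw [pv_getD_map prods (pvB_elig nts) false (n+i) hlt, hp i hi]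
    congr 1
    rw [hc.2 (n+i) hlt, hp i hi]
    cases hD : (pvCnt nts N ps[i] == 0)
    · simp at hD
      simp [hD]
    · simp at hD
      simp [hD]
  rw [pv_any_range' ps n (fun pid => (prods.map (pvB_elig nts)).getD pid false && (c.getD pid 0 == 0))
    (fun p => pvB_elig nts p && (pvCnt nts N p == 0)) hpw, pv_scan_eq]
  apply PySem.List.any_congr_mem
  intro p _
  rw [pv_check_eq]
  cases hA : p.isEmpty <;> cases hB : (p == ["!epsilon"]) <;>
    cases hC : p.all (fun s => nts.contains s || s == "!epsilon") <;>
    cases hD : (pvCnt nts N p == 0) <;>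
    simp only [pvB_elig, hA, hB, hC, hD] <;> rfl

theorem pv_round_eq (g : PySem.Dict String (List (List String))) (nts : List String)
    (prods : List (List String)) (prodIds : PySem.Dict String (List Nat)) (l : List String)
    (hIds : pvIdsOk g prods prodIds l) (hmem : ∀ V ∈ l, nts.contains V = true) :
    ∀ (N : List String) (c : List Int) (ch : Bool), pvCntInv nts prods N c →
      (pvB_round prodIds (prods.map (pvB_elig nts)) (pvB_rev prods) l (N, c, ch)).1
          = (pvA_round g nts l (N, ch)).1 ∧
        (pvB_round prodIds (prods.map (pvB_elig nts)) (pvB_rev prods) l (N, c, ch)).2.2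
          = (pvA_round g nts l (N, ch)).2 ∧
        pvCntInv nts prods (pvB_round prodIds (prods.map (pvB_elig nts)) (pvB_rev prods) l (N, c, ch)).1
          (pvB_round prodIds (prods.map (pvB_elig nts)) (pvB_rev prods) l (N, c, ch)).2.1 := by
  induction l with
  | nil =>
    intro N c ch hc
    exact ⟨rfl, rfl, hc⟩
  | cons V l ih =>
    intro N c ch hc
    have hmemV : nts.contains V = true := hmem V (by simp)
    have hIds' : pvIdsOk g prods prodIds l := fun W hW => hIds W (by simp [hW])
    have hmem' : ∀ W ∈ l, nts.contains W = true := fun W hW => hmem W (by simp [hW])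
    simp only [pvB_round, pvA_round, List.foldl_cons] at ih ⊢
    by_cases hVN : V ∈ N
    · have hcon : N.contains V = true := by simpa using hVN
      simp only [hcon, if_true]
      exact ih hIds' hmem' N c ch hc
    · have hcon : N.contains V = false := by simpa using hVN
      simp only [hcon, Bool.false_eq_true, if_false]
      cases hg : g.get? V with
      | none =>
        have hid0 : prodIds.getD V [] = [] := by
          have := hIds V (by simp)
          rw [hg] at this
          exact this
        simp only [hid0, List.any_nil, Bool.false_eq_true, if_false]
        exact ih hIds' hmem' N c ch hc
      | some ps =>
        have hdec := pv_decide_eq g nts (V :: l) prods prodIds N c V ps hIds (by simp) hg hc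
        rw [hdec]
        by_cases hscan : pvA_scan nts N ps = true
        · simp only [hscan, if_true]
          have hadd : PySem.Set.add N V = N ++ [V] := by simp [PySem.Set.add, hVN]
          have hinv' := pv_add_inv nts prods N c V hc hmemV hVN
          have := ih hIds' hmem' (N ++ [V]) (pvB_add (pvB_rev prods) (N, c) V).2 true hinv'
          simpa [pvB_add, hadd] using this
        · simp only [Bool.not_eq_true] at hscan
          simp only [hscan, Bool.false_eq_true, if_false]
          exact ih hIds' hmem' N c ch hc

theorem pv_loop_eq (g : PySem.Dict String (List (List String))) (nts : List String)
    (prods : List (List String)) (prodIds : PySem.Dict String (List Nat)) (nt : List String)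
    (hIds : pvIdsOk g prods prodIds nt) (hmem : ∀ V ∈ nt, nts.contains V = true) :
    ∀ (fuel : Nat) (N : List String) (c : List Int), pvCntInv nts prods N c →
      pvB_loop prodIds (prods.map (pvB_elig nts)) (pvB_rev prods) nt fuel (N, c)
        = pvA_loop g nts nt fuel N := by
  intro fuel
  induction fuel with
  | zero => intro N c _; rfl
  | succ fuel ih =>
    intro N c hc
    obtain ⟨e1, e2, hinv⟩ := pv_round_eq g nts prods prodIds nt hIds hmem N c false hc
    simp only [pvB_loop, pvA_loop]
    rw [e2]
    by_cases hch : (pvA_round g nts nt (N, false)).2 = true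
    · simp only [hch, if_true]
      have := ih (pvB_round prodIds (prods.map (pvB_elig nts)) (pvB_rev prods) nt (N, c, false)).1
        (pvB_round prodIds (prods.map (pvB_elig nts)) (pvB_rev prods) nt (N, c, false)).2.1 hinv
      rw [this, e1]
    · simp only [Bool.not_eq_true] at hch
      simp only [hch, Bool.false_eq_true, if_false]
      exact e1

theorem pv_init_eq (g : PySem.Dict String (List (List String))) (nts : List String)
    (prods : List (List String)) (prodIds : PySem.Dict String (List Nat)) (l : List String)
    (hIds : pvIdsOk g prods prodIds l) (hmem : ∀ V ∈ l, nts.contains V = true) :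
    ∀ (N : List String) (c : List Int), pvCntInv nts prods N c →
      (l.foldl (fun (st : List String × List Int) V =>
          if !(st.1.contains V) && (prodIds.getD V []).any (fun pid => prods.getD pid [] == ["!epsilon"]) then
            pvB_add (pvB_rev prods) st V
          else st) (N, c)).1
        = l.foldl (fun nullable V =>
            match g.get? V with
            | none => nullable
            | some ps => if ps.any (fun p => p == ["!epsilon"]) then PySem.Set.add nullable V else nullable) N ∧
      pvCntInv nts prods
        (l.foldl (fun (st : List String × List Int) V =>
          if !(st.1.contains V) && (prodIds.getD V []).any (fun pid => prods.getD pid [] == ["!epsilon"]) then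
            pvB_add (pvB_rev prods) st V
          else st) (N, c)).1
        (l.foldl (fun (st : List String × List Int) V =>
          if !(st.1.contains V) && (prodIds.getD V []).any (fun pid => prods.getD pid [] == ["!epsilon"]) then
            pvB_add (pvB_rev prods) st V
          else st) (N, c)).2 := by
  induction l with
  | nil =>
    intro N c hc
    exact ⟨rfl, hc⟩
  | cons V l ih =>
    intro N c hc
    have hmemV : nts.contains V = true := hmem V (by simp)
    have hIds' : pvIdsOk g prods prodIds l := fun W hW => hIds W (by simp [hW])
    have hmem' : ∀ W ∈ l, nts.contains W = true := fun W hW => hmem W (by simp [hW])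
    simp only [List.foldl_cons] at ih ⊢
    by_cases hVN : V ∈ N
    · have hcon : N.contains V = true := by simpa using hVN
      have hA : (match g.get? V with
          | none => N
          | some ps => if ps.any (fun p => p == ["!epsilon"]) then PySem.Set.add N V else N) = N := by
        cases hg : g.get? V with
        | none => rfl
        | some ps =>
          by_cases ha : ps.any (fun p => p == ["!epsilon"]) = true
          · simp [ha, PySem.Set.add, hVN]
          · simp only [Bool.not_eq_true] at ha
            simp [ha]
      simp only [hcon, Bool.not_true, Bool.false_and, Bool.false_eq_true, if_false, hA]
      exact ih hIds' hmem' N c hc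
    · have hcon : N.contains V = false := by simpa using hVN
      cases hg : g.get? V with
      | none =>
        have hid0 : prodIds.getD V [] = [] := by
          have := hIds V (by simp)
          rw [hg] at this
          exact this
        simp only [hg, hid0, List.any_nil, Bool.and_false, Bool.false_eq_true, if_false]
        exact ih hIds' hmem' N c hc
      | some ps =>
        have hIdsV := hIds V (by simp : V ∈ V :: l)
        rw [hg] at hIdsV
        obtain ⟨n, hids, hb, hp⟩ := hIdsV
        have hany : (prodIds.getD V []).any (fun pid => prods.getD pid [] == ["!epsilon"])
            = ps.any (fun p => p == ["!epsilon"]) := by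
          rw [hids]
          exact pv_any_range' ps n (fun pid => prods.getD pid [] == ["!epsilon"])
            (fun p => p == ["!epsilon"]) (fun i hi => by
              show (prods.getD (n+i) [] == ["!epsilon"]) = (ps[i] == ["!epsilon"])
              rw [hp i hi])
        simp only [hg, hany, hcon, Bool.not_false, Bool.true_and]
        by_cases ha : ps.any (fun p => p == ["!epsilon"]) = true
        · simp only [ha, if_true]
          have hadd : PySem.Set.add N V = N ++ [V] := by simp [PySem.Set.add, hVN]
          have hinv' := pv_add_inv nts prods N c V hc hmemV hVN
          have := ih hIds' hmem' (N ++ [V]) (pvB_add (pvB_rev prods) (N, c) V).2 hinv'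
          simpa [pvB_add, hadd] using this
        · simp only [Bool.not_eq_true] at ha
          simp only [ha, Bool.false_eq_true, if_false]
          exact ih hIds' hmem' N c hc

-- ===== VERDICT (by name: the statement is the Claim_ definition above) =====
theorem find_nullable_non_terminals_spec : Claim_equal_find_nullable_non_terminals := by
  intro grammar nt _
  show find_nullable_non_terminals grammar nt = find_nullable_non_terminals_alt grammar nt
  have hIds := pv_index_ok (PySem.Dict.mk grammar) nt
  have hmem : ∀ V ∈ nt, (PySem.Set.ofList nt).contains V = true := by
    intro V hV
    have : V ∈ PySem.Set.ofList nt := (PySem.Set.mem_ofList nt V).mpr hV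
    simpa using this
  have hinv0 : pvCntInv (PySem.Set.ofList nt) (pvB_index (PySem.Dict.mk grammar) nt).1 []
      ((pvB_index (PySem.Dict.mk grammar) nt).1.map
        (fun p => ((p.countP (fun s => (PySem.Set.ofList nt).contains s)) : Int))) := by
    refine ⟨by simp, fun pid h => ?_⟩
    rw [pv_getD_map _ _ _ _ h]
    simp [pvCnt]
  obtain ⟨hN0, hinv1⟩ := pv_init_eq (PySem.Dict.mk grammar) (PySem.Set.ofList nt)
    (pvB_index (PySem.Dict.mk grammar) nt).1 (pvB_index (PySem.Dict.mk grammar) nt).2 nt hIds hmem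
    [] _ hinv0
  have hloop := pv_loop_eq (PySem.Dict.mk grammar) (PySem.Set.ofList nt)
    (pvB_index (PySem.Dict.mk grammar) nt).1 (pvB_index (PySem.Dict.mk grammar) nt).2 nt hIds hmem
    (nt.length+1) _ _ hinv1
  have e1 : find_nullable_non_terminals grammar nt
      = pvA_loop (PySem.Dict.mk grammar) (PySem.Set.ofList nt) nt (nt.length + 1)
        (nt.foldl (fun nullable V => match (PySem.Dict.mk grammar).get? V with
          | none => nullable
          | some ps => if ps.any (fun p => p == ["!epsilon"]) then PySem.Set.add nullable V else nullable)
          []) := rfl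
  rw [e1, ← hN0]
  exact hloop.symm
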